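-- pv_equiv track=rewrite | github.com/ishaanbuildsthings/leetcode | A_Gym_Plates.py | numToTernaryMaskAndCounts
-- ===== SOURCE A (Python) =====
-- def numToTernaryMaskAndCounts(num):
--     cnt = [0] * 10
--     for c in str(num):
--         cnt[int(c)] += 1
--         if cnt[int(c)] == 3: return (None, None)
--     mask = 0
--     for i, v in enumerate(cnt):
--         mask += 3**i * v
--     return (mask, cnt)
-- ===== SOURCE B (Python) =====
-- def numToTernaryMaskAndCounts(num):
--     # count digits arithmetically via divmod, no string conversion at all
--     cnt = [0] * 10
--     n = num
--     while n > 9: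
--         n, d = divmod(n, 10)
--         cnt[d] += 1
--     cnt[n] += 1  # leading digit
--     if all(v < 3 for v in cnt):
--         mask = 0
--         for v in reversed(cnt):
--             mask = mask * 3 + v
--         return (mask, cnt)
--     return (None, None)
-- ===== Notes on version B (the rewrite author's own statement) =====
-- stated objective: alternative
-- what changed: A iterates over the characters of str(num) with a fused early (None,None) exit and sums 3**i*v over enumerate(cnt); B never builds a string: it extracts digits arithmetically with divmod in a while loop (LSB first, leading digit last), then checks all(v<3) as a separate stage and encodes the mask by Horner's rule over reversed(cnt).
import Mathlib
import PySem

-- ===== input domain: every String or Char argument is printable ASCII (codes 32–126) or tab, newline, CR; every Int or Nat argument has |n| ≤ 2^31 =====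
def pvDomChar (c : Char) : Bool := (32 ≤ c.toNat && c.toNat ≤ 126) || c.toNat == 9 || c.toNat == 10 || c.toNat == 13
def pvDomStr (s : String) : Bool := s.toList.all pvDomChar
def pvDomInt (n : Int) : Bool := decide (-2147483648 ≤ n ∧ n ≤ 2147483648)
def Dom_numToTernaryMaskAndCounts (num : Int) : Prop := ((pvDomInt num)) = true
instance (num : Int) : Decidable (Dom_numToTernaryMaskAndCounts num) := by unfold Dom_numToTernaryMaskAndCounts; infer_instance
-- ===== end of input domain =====

-- B replaces A's iteration over str(num) by arithmetic digit extraction with divmod, a separate all(v<3) check and Horner encoding; same cost, no speed claim.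

-- ===== PORT A =====
-- cnt[int(c)] += 1 in A. int(c) is modelled as c.toNat - 48 (Nat), exact for digit
-- characters; for any other character Python's int(c) raises ValueError, and such
-- characters never occur in str(num) for num ≥ 0, the only inputs Pre_ admits.
def pvBump (cnt : List Int) (c : Char) : List Int :=
  let d : Nat := c.toNat - 48
  cnt.set d (cnt.getD d 0 + 1)

-- the 'for c in str(num)' loop with its early 'return (None, None)'
def pvALoop : List Char → List Int → Option (List Int)
  | [], cnt => some cnt
  | c :: cs, cnt =>
      let cnt' := pvBump cnt c
      if cnt'.getD (c.toNat - 48) 0 = 3 then none else pvALoop cs cnt'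

def numToTernaryMaskAndCounts (num : Int) : Option Int × Option (List Int) :=
  match pvALoop (PySem.Int.toChars num) (List.replicate 10 0) with
  | none => (none, none)
  | some cnt =>
      let mask := (PySem.List.enumerate cnt).foldl (fun m p => m + 3 ^ p.1.toNat * p.2) 0
      (some mask, some cnt)

-- ===== PORT B =====
-- cnt[d] += 1 with a Python int index (pySetD/pyGetD are Python-exact, incl. negative wrap)
def pvBumpI (cnt : List Int) (d : Int) : List Int :=
  PySem.List.pySetD cnt d (PySem.List.pyGetD cnt d 0 + 1)

-- 'while n > 9: n, d = divmod(n, 10); cnt[d] += 1'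
def pvBLoop (n : Int) (cnt : List Int) : Int × List Int :=
  if 9 < n then pvBLoop (PySem.Int.floordiv n 10) (pvBumpI cnt (PySem.Int.mod n 10))
  else (n, cnt)
termination_by n.toNat
decreasing_by
  rw [PySem.Int.floordiv_eq_ediv_of_pos (by norm_num)]
  omega

def numToTernaryMaskAndCounts_alt (num : Int) : Option Int × Option (List Int) :=
  let p := pvBLoop num (List.replicate 10 0)
  let cnt := pvBumpI p.2 p.1          -- cnt[n] += 1, the leading digit
  if cnt.all (fun v => v < 3) then
    (some (cnt.reverse.foldl (fun m v => m * 3 + v) 0), some cnt)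
  else (none, none)

-- ===== PRECONDITION & SPEC =====
-- Pre_ excludes exactly the negative inputs, on which Python A raises ValueError (int of the minus sign).
def Pre_numToTernaryMaskAndCounts (num : Int) : Prop := 0 ≤ num
instance (num : Int) : Decidable (Pre_numToTernaryMaskAndCounts num) := by unfold Pre_numToTernaryMaskAndCounts; infer_instance
def pvWitness_numToTernaryMaskAndCounts : Int := 1223334

def Spec_numToTernaryMaskAndCounts (num : Int) (out : Option Int × Option (List Int)) : Prop := out = numToTernaryMaskAndCounts_alt num
instance (num : Int) (out : Option Int × Option (List Int)) : Decidable (Spec_numToTernaryMaskAndCounts num out) := by unfold Spec_numToTernaryMaskAndCounts; infer_instance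

-- ===== CLAIM (what is proved, stated in full; the proofs are below) =====
def Claim_equal_numToTernaryMaskAndCounts : Prop := ∀ (num : Int), Dom_numToTernaryMaskAndCounts num → Pre_numToTernaryMaskAndCounts num → Spec_numToTernaryMaskAndCounts num (numToTernaryMaskAndCounts num)

-- ===== LEMMAS AND PROOFS =====

theorem getD_set' (l : List Int) (i j : Nat) (v : Int) :
    (l.set i v).getD j 0 = if i = j ∧ i < l.length then v else l.getD j 0 := by
  by_cases hij : i = j
  · subst hij
    by_cases hlt : i < l.length
    · rw [if_pos ⟨rfl, hlt⟩, List.getD_eq_getElem _ _ (by simpa using hlt), List.getElem_set_self]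
    · rw [if_neg (by tauto), List.set_eq_of_length_le (by omega)]
  · rw [if_neg (by tauto)]
    simp [List.getD_eq_getElem?_getD, List.getElem?_set_ne hij]

theorem getD_lt_three (cnt : List Int) (h : ∀ x ∈ cnt, x < 3) (j : Nat) : cnt.getD j 0 < 3 := by
  by_cases hj : j < cnt.length
  · rw [List.getD_eq_getElem _ _ hj]; exact h _ (List.getElem_mem hj)
  · rw [List.getD_eq_default _ _ (by omega)]; norm_num

theorem foldl_bump_getD_le (cs : List Char) (cnt : List Int) (j : Nat) :
    cnt.getD j 0 ≤ (cs.foldl pvBump cnt).getD j 0 := by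
  induction cs generalizing cnt with
  | nil => simp
  | cons c cs ih =>
      refine le_trans ?_ (ih (pvBump cnt c))
      unfold pvBump
      rw [getD_set']
      split_ifs with hc
      · obtain ⟨h1, _⟩ := hc; subst h1; omega
      · exact le_refl _

theorem foldl_bump_length (cs : List Char) (cnt : List Int) :
    (cs.foldl pvBump cnt).length = cnt.length := by
  induction cs generalizing cnt with
  | nil => rfl
  | cons c cs ih => simp [ih, pvBump]

-- A's fused loop, characterised as count-then-check
theorem pvALoop_eq (cs : List Char) (cnt : List Int) (h : ∀ x ∈ cnt, x < 3) :
    pvALoop cs cnt =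
      (if (cs.foldl pvBump cnt).any (fun v => 3 ≤ v) then none else some (cs.foldl pvBump cnt)) := by
  induction cs generalizing cnt with
  | nil =>
      have : cnt.any (fun v => 3 ≤ v) = false := by
        simp only [List.any_eq_false, decide_eq_true_eq]
        intro x hx
        exact not_le.mpr (h x hx)
      simp [pvALoop, this]
  | cons c cs ih =>
      set d : Nat := c.toNat - 48 with hd
      have hbump : pvBump cnt c = cnt.set d (cnt.getD d 0 + 1) := rfl
      have htest : (pvBump cnt c).getD d 0
          = if d < cnt.length then cnt.getD d 0 + 1 else cnt.getD d 0 := by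
        rw [hbump, getD_set']
        split_ifs with h1 h2 <;> tauto
      by_cases hret : (pvBump cnt c).getD d 0 = 3
      · have hdlt : d < cnt.length := by
          by_contra hge
          rw [htest, if_neg hge] at hret
          exact absurd hret (by have := getD_lt_three cnt h d; omega)
        have hmono := foldl_bump_getD_le cs (pvBump cnt c) d
        have hlen : (cs.foldl pvBump (pvBump cnt c)).length = cnt.length := by
          rw [foldl_bump_length, hbump]; simp
        have hmem : (cs.foldl pvBump (pvBump cnt c)).getD d 0 ∈ cs.foldl pvBump (pvBump cnt c) := by
          rw [List.getD_eq_getElem _ _ (by omega)]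
          exact List.getElem_mem (by omega)
        have hany : ((c :: cs).foldl pvBump cnt).any (fun v => 3 ≤ v) = true := by
          rw [List.foldl_cons, List.any_eq_true]
          exact ⟨_, hmem, by rw [hret] at hmono; simpa using hmono⟩
        rw [if_pos hany]
        show (if (pvBump cnt c).getD d 0 = 3 then none else pvALoop cs (pvBump cnt c)) = (none : Option (List Int))
        rw [if_pos hret]
      · have h' : ∀ x ∈ pvBump cnt c, x < 3 := by
          intro x hx
          rw [hbump] at hx
          rcases List.mem_or_eq_of_mem_set hx with hx' | hx'
          · exact h x hx'
          · subst hx'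
            have hlt := getD_lt_three cnt h d
            by_cases hdlt : d < cnt.length
            · rw [htest, if_pos hdlt] at hret
              omega
            · rw [List.getD_eq_default _ _ (by omega)]
              norm_num
        show (if (pvBump cnt c).getD d 0 = 3 then none else pvALoop cs (pvBump cnt c)) = _
        rw [if_neg hret, List.foldl_cons]
        exact ih (pvBump cnt c) h'

-- ---- bumps commute (different indices touch different cells) ----

theorem bumpN_comm (cnt : List Int) (i j : Nat) :
    (cnt.set i (cnt.getD i 0 + 1)).set j ((cnt.set i (cnt.getD i 0 + 1)).getD j 0 + 1)
      = (cnt.set j (cnt.getD j 0 + 1)).set i ((cnt.set j (cnt.getD j 0 + 1)).getD i 0 + 1) := by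
  by_cases hij : i = j
  · subst hij; rfl
  · have h1 : (cnt.set i (cnt.getD i 0 + 1)).getD j 0 = cnt.getD j 0 := by
      rw [getD_set', if_neg (by tauto)]
    have h2 : (cnt.set j (cnt.getD j 0 + 1)).getD i 0 = cnt.getD i 0 := by
      rw [getD_set', if_neg (by tauto)]
    rw [h1, h2, List.set_comm _ _ hij]

theorem pvBump_comm (cnt : List Int) (a c : Char) :
    pvBump (pvBump cnt c) a = pvBump (pvBump cnt a) c := by
  simp only [pvBump]
  exact bumpN_comm cnt (c.toNat - 48) (a.toNat - 48)

theorem foldr_pvBump_swap (l : List Char) (cnt : List Int) (c : Char) :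
    l.foldr (fun c acc => pvBump acc c) (pvBump cnt c)
      = pvBump (l.foldr (fun c acc => pvBump acc c) cnt) c := by
  induction l with
  | nil => rfl
  | cons a l ih => rw [List.foldr_cons, List.foldr_cons, ih, pvBump_comm]

theorem foldl_pvBump_eq_foldr (l : List Char) (cnt : List Int) :
    l.foldl pvBump cnt = l.foldr (fun c acc => pvBump acc c) cnt := by
  induction l generalizing cnt with
  | nil => rfl
  | cons a l ih => rw [List.foldl_cons, ih, List.foldr_cons, foldr_pvBump_swap]

-- ---- str(n) for n : Nat, digit by digit ----

theorem toDigitsCore_shift (f n : Nat) (l : List Char) :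
    Nat.toDigitsCore 10 f n l = Nat.toDigitsCore 10 f n [] ++ l := by
  induction f generalizing n l with
  | zero => simp [Nat.toDigitsCore]
  | succ f ih =>
      simp only [Nat.toDigitsCore]
      by_cases h : n / 10 = 0
      · simp [h]
      · simp only [h, if_false]
        rw [ih (n / 10) (Nat.digitChar (n % 10) :: l), ih (n / 10) [Nat.digitChar (n % 10)]]
        simp

theorem toDigitsCore_fuel (n : Nat) : ∀ f₁ f₂ : Nat, n < f₁ → n < f₂ → ∀ l,
    Nat.toDigitsCore 10 f₁ n l = Nat.toDigitsCore 10 f₂ n l := by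
  induction n using Nat.strong_induction_on with
  | _ n ih =>
    intro f₁ f₂ h1 h2 l
    match f₁, f₂ with
    | g₁ + 1, g₂ + 1 =>
      simp only [Nat.toDigitsCore]
      by_cases h : n / 10 = 0
      · simp [h]
      · simp only [h, if_false]
        exact ih (n / 10) (by omega) g₁ g₂ (by omega) (by omega) _

theorem toDigits_base (n : Nat) (h : n < 10) : Nat.toDigits 10 n = [Nat.digitChar n] := by
  show Nat.toDigitsCore 10 (n + 1) n [] = _
  simp only [Nat.toDigitsCore]
  simp [Nat.div_eq_of_lt h, Nat.mod_eq_of_lt h]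

theorem toDigits_step (n : Nat) (h : 10 ≤ n) :
    Nat.toDigits 10 n = Nat.toDigits 10 (n / 10) ++ [Nat.digitChar (n % 10)] := by
  show Nat.toDigitsCore 10 (n + 1) n [] = _
  simp only [Nat.toDigitsCore]
  have h0 : ¬ n / 10 = 0 := by omega
  simp only [h0, if_false]
  rw [toDigitsCore_shift, toDigitsCore_fuel (n / 10) n (n / 10 + 1) (by omega) (by omega)]
  rfl

theorem digitChar_idx (d : Nat) (h : d < 10) : (Nat.digitChar d).toNat - 48 = d := by
  interval_cases d <;> decide

theorem pvBumpI_digitChar (cnt : List Int) (d : Nat) (h : d < 10) :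
    pvBumpI cnt ((d : Nat) : Int) = pvBump cnt (Nat.digitChar d) := by
  simp [pvBumpI, pvBump, digitChar_idx d h, PySem.List.pySetD_natCast, PySem.List.pyGetD_natCast]

-- B's while loop + final bump count exactly the decimal digits of m
theorem bloop_eq (m : Nat) : ∀ cnt : List Int,
    pvBumpI (pvBLoop ((m : Nat) : Int) cnt).2 (pvBLoop ((m : Nat) : Int) cnt).1
      = (Nat.toDigits 10 m).foldr (fun c acc => pvBump acc c) cnt := by
  induction m using Nat.strong_induction_on with
  | _ m ih =>
    intro cnt
    by_cases h : m < 10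
    · have h9 : ¬ (9 : Int) < ((m : Nat) : Int) := by exact_mod_cast (by omega : ¬ 9 < m)
      rw [pvBLoop, if_neg h9, toDigits_base m h, List.foldr_cons, List.foldr_nil,
        pvBumpI_digitChar cnt m h]
    · have h9 : (9 : Int) < ((m : Nat) : Int) := by exact_mod_cast (by omega : 9 < m)
      have hf : PySem.Int.floordiv ((m : Nat) : Int) 10 = ((m / 10 : Nat) : Int) := by
        exact_mod_cast PySem.Int.floordiv_natCast m 10
      have hmod : PySem.Int.mod ((m : Nat) : Int) 10 = ((m % 10 : Nat) : Int) := by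
        exact_mod_cast PySem.Int.mod_natCast m 10
      rw [pvBLoop, if_pos h9, hf, hmod,
        pvBumpI_digitChar cnt (m % 10) (by omega),
        toDigits_step m (by omega), List.foldr_append, List.foldr_cons, List.foldr_nil]
      exact ih (m / 10) (by omega) _

-- ---- the two mask encodings ----

def pvHorner (l : List Int) : Int := l.foldr (fun v m => m * 3 + v) 0

theorem mask_enum_eq (l : List Int) (s : Nat) (m : Int) :
    (PySem.List.enumerate l (s : Int)).foldl (fun m p => m + 3 ^ p.1.toNat * p.2) m
      = m + 3 ^ s * pvHorner l := by
  induction l generalizing s m with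
  | nil => simp [pvHorner, PySem.List.enumerate_nil]
  | cons v vs ih =>
      have : ((s : Int) + 1) = ((s + 1 : Nat) : Int) := by push_cast; ring
      rw [PySem.List.enumerate_cons, List.foldl_cons, this, ih]
      simp only [pvHorner, List.foldr_cons, Int.toNat_natCast]
      ring

theorem mask_horner_eq (l : List Int) :
    l.reverse.foldl (fun m v => m * 3 + v) 0 = pvHorner l := by
  rw [List.foldl_reverse]; rfl

-- ===== VERDICT (by name: the statement is the Claim_ definition above) =====
theorem numToTernaryMaskAndCounts_spec : Claim_equal_numToTernaryMaskAndCounts := by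
  intro num _ hpre
  obtain ⟨m, rfl⟩ : ∃ m : Nat, num = (m : Int) := ⟨num.toNat, (Int.toNat_of_nonneg hpre).symm⟩
  unfold Spec_numToTernaryMaskAndCounts numToTernaryMaskAndCounts numToTernaryMaskAndCounts_alt
  have hch : PySem.Int.toChars ((m : Nat) : Int) = Nat.toDigits 10 m := by
    simp [PySem.Int.toChars, Int.not_lt.mpr (Int.natCast_nonneg m)]
  have hinit : ∀ x ∈ List.replicate 10 (0 : Int), x < 3 := by
    intro x hx
    have := List.eq_of_mem_replicate hx
    omega
  rw [hch, pvALoop_eq _ _ hinit, foldl_pvBump_eq_foldr]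
  simp only [bloop_eq m (List.replicate 10 0)]
  set cnt := (Nat.toDigits 10 m).foldr (fun c acc => pvBump acc c) (List.replicate 10 0) with hcnt
  by_cases hany : cnt.any (fun v => 3 ≤ v) = true
  · have hall : cnt.all (fun v => v < 3) = false := by
      rw [List.all_eq_false]
      obtain ⟨x, hx, h3⟩ := List.any_eq_true.mp hany
      exact ⟨x, hx, by simpa using h3⟩
    rw [if_pos hany, if_neg (by rw [hall]; simp)]
  · have hall : cnt.all (fun v => v < 3) = true := by
      rw [List.all_eq_true]
      intro x hx
      have hlt : ∀ x ∈ cnt, x < 3 := by simpa using hany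
      simpa using hlt x hx
    rw [if_neg hany, if_pos (by rw [hall])]
    have hm := mask_enum_eq cnt 0 0
    simp only [Nat.cast_zero, pow_zero, one_mul, zero_add] at hm
    rw [mask_horner_eq]
    exact congrArg₂ (fun a b => (some a, some b)) hm rfl
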